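-- pv_equiv track=rewrite | github.com/diem/off-chain-reference | src/status_logic.py | filter_for_starting_states
-- ===== SOURCE A (Python) =====
-- from collections import defaultdict
--
-- def filter_for_starting_states(lattice, starting_states):
--     ''' Returns all transitions reacheable from the starting states '''
--     lattice_map = defaultdict(set)
--     for (st, nd) in lattice:
--         lattice_map[st].add(nd)
--
--     reach = set()
--     for item in starting_states:
--         to_explore = set([ item ])
--         while to_explore != set():
--             next = to_explore.pop()
--             reach.add(next)
--             to_explore = to_explore | lattice_map[next]
--             to_explore = to_explore - reach
--
--     lattice = [(st, en) for (st, en) in lattice if st in reach]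
--     return lattice
-- ===== SOURCE B (Python) =====
-- def filter_for_starting_states(lattice, starting_states):
--     ''' Returns all transitions reacheable from the starting states '''
--     # Fixed-point iteration: no adjacency map, no worklist -- sweep the whole
--     # edge list, adding targets of already-reachable sources, until stable.
--     reach = set(starting_states)
--     changed = True
--     while changed:
--         changed = False
--         for (st, nd) in lattice:
--             if st in reach and nd not in reach:
--                 reach.add(nd)
--                 changed = True
--     return [(st, en) for (st, en) in lattice if st in reach]
-- ===== Notes on version B (the rewrite author's own statement) =====
-- stated objective: alternative
-- what changed: A builds an adjacency map and runs a per-start-state worklist of set unions/differences; B drops the adjacency map and worklist entirely and computes the same reachable set by fixed-point iteration, sweeping the raw edge list repeatedly and adding targets of reachable sources until a sweep changes nothing.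
import Mathlib
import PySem

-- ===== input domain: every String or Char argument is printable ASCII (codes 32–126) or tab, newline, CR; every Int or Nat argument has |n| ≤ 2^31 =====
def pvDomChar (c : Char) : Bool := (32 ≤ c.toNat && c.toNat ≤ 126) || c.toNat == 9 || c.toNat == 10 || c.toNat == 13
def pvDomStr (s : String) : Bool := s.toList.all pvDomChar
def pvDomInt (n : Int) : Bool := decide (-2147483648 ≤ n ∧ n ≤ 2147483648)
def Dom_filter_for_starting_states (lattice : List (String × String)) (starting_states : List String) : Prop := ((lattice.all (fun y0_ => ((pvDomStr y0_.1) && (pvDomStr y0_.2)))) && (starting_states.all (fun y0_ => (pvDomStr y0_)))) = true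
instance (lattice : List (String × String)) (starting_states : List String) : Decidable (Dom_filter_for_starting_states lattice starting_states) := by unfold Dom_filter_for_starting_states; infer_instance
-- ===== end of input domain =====

-- B replaces A's adjacency-map + per-start-state worklist by fixed-point iteration over the raw edge
-- list (sweep all edges, add targets of reachable sources, repeat until stable); same return value.

-- lemma used by port A's termination proof: any element of a stored value is in the flattened values
lemma pvGetD_subset_flatten (d : PySem.Dict String (PySem.Set String)) (k x : String)
    (hx : x ∈ d.getD k PySem.Set.empty) : x ∈ d.values.flatten := by
  rw [PySem.Dict.getD_eq_get?_getD] at hx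
  cases h : d.get? k with
  | none => rw [h] at hx; simp [PySem.Set.empty] at hx
  | some v =>
    rw [h] at hx
    have hm := PySem.Dict.mem_items_of_get?_eq_some d h
    have hv : v ∈ d.values := by
      simp only [PySem.Dict.values]
      exact List.mem_map.mpr ⟨(k, v), hm, rfl⟩
    exact List.mem_flatten.mpr ⟨v, hv, hx⟩

-- ===== PORT A =====
-- A's inner while-loop.  Python's set.pop() removes an arbitrary element; the function's result does
-- not depend on that order (the final reach set is the reachability closure), so the port pops the
-- first element of the Set's underlying list.
def pvALoop (lmap : PySem.Dict String (PySem.Set String)) (reach toExplore : PySem.Set String) : PySem.Set String :=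
  match toExplore with
  | [] => reach
  | next :: rest =>
      let reach' := PySem.Set.add reach next
      let toExplore' := PySem.Set.diff (PySem.Set.union rest (lmap.getD next PySem.Set.empty)) reach'
      pvALoop lmap reach' toExplore'
  termination_by (((toExplore.toFinset ∪ (lmap.values.flatten).toFinset) \ reach.toFinset).card,
                  (toExplore.filter (fun x => decide (x ∈ reach))).length)
  decreasing_by
    by_cases hmem : next ∈ reach
    · have hre : PySem.Set.add reach next = reach := by
        simp [PySem.Set.add, hmem]
      have hsub : ((PySem.Set.diff (PySem.Set.union rest (lmap.getD next PySem.Set.empty)) (PySem.Set.add reach next)).toFinset ∪ (lmap.values.flatten).toFinset) \ reach.toFinset ⊆ ((next :: rest).toFinset ∪ (lmap.values.flatten).toFinset) \ reach.toFinset := by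
        intro x hx
        simp only [Finset.mem_sdiff, Finset.mem_union, List.mem_toFinset, PySem.Set.mem_diff, PySem.Set.mem_union, List.mem_cons] at hx ⊢
        obtain ⟨hx1, hx2⟩ := hx
        refine ⟨?_, hx2⟩
        rcases hx1 with ⟨h1, -⟩ | hV
        · rcases h1 with h1 | h1
          · exact Or.inl (Or.inr h1)
          · exact Or.inr (pvGetD_subset_flatten lmap next x h1)
        · exact Or.inr hV
      have hk : (((PySem.Set.diff (PySem.Set.union rest (lmap.getD next PySem.Set.empty)) (PySem.Set.add reach next)).toFinset ∪ (lmap.values.flatten).toFinset) \ reach.toFinset).card ≤ (((next :: rest).toFinset ∪ (lmap.values.flatten).toFinset) \ reach.toFinset).card := Finset.card_le_card hsub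
      have hb : ((PySem.Set.diff (PySem.Set.union rest (lmap.getD next PySem.Set.empty)) (PySem.Set.add reach next)).filter (fun x => decide (x ∈ PySem.Set.add reach next))).length < ((next :: rest).filter (fun x => decide (x ∈ reach))).length := by
        have h0 : ((PySem.Set.diff (PySem.Set.union rest (lmap.getD next PySem.Set.empty)) (PySem.Set.add reach next)).filter (fun x => decide (x ∈ PySem.Set.add reach next))).length = 0 := by
          rw [List.length_eq_zero_iff, List.filter_eq_nil_iff]
          intro x hx
          rw [PySem.Set.mem_diff] at hx
          simpa using hx.2
        rw [h0, List.filter_cons]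
        simp [hmem]
      rw [hre] at hk hb ⊢
      rcases lt_or_eq_of_le hk with hlt | heq
      · exact Prod.Lex.left _ _ hlt
      · rw [heq]; exact Prod.Lex.right _ hb
    · apply Prod.Lex.left
      have hnext : next ∈ ((next :: rest).toFinset ∪ (lmap.values.flatten).toFinset) \ reach.toFinset := by
        simp [hmem]
      have hsub : ((PySem.Set.diff (PySem.Set.union rest (lmap.getD next PySem.Set.empty)) (PySem.Set.add reach next)).toFinset ∪ (lmap.values.flatten).toFinset) \ (PySem.Set.add reach next).toFinset ⊆ ((((next :: rest).toFinset ∪ (lmap.values.flatten).toFinset) \ reach.toFinset).erase next) := by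
        intro x hx
        simp only [Finset.mem_sdiff, Finset.mem_union, List.mem_toFinset, PySem.Set.mem_diff, PySem.Set.mem_union, List.mem_cons, Finset.mem_erase, PySem.Set.mem_add] at hx ⊢
        obtain ⟨hx1, hx2⟩ := hx
        push Not at hx2
        refine ⟨hx2.2, ?_, hx2.1⟩
        rcases hx1 with ⟨h1, -⟩ | hV
        · rcases h1 with h1 | h1
          · exact Or.inl (Or.inr h1)
          · exact Or.inr (pvGetD_subset_flatten lmap next x h1)
        · exact Or.inr hV
      calc _ ≤ ((((next :: rest).toFinset ∪ (lmap.values.flatten).toFinset) \ reach.toFinset).erase next).card := Finset.card_le_card hsub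
        _ < _ := Finset.card_erase_lt_of_mem hnext

def filter_for_starting_states (lattice : List (String × String)) (starting_states : List String) : List (String × String) :=
  -- lattice_map = defaultdict(set); for (st, nd) in lattice: lattice_map[st].add(nd)
  let lattice_map := lattice.foldl (fun d p => d.modify p.1 PySem.Set.empty (fun s => PySem.Set.add s p.2)) PySem.Dict.empty
  -- reach = set(); for item in starting_states: <inner while-loop>
  let reach := starting_states.foldl (fun reach item => pvALoop lattice_map reach (PySem.Set.ofList [item])) PySem.Set.empty
  -- [(st, en) for (st, en) in lattice if st in reach]
  lattice.filter (fun p => PySem.Set.contains reach p.1)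

-- ===== PORT B =====
-- one sweep of B's inner for-loop: 'changed = False; for (st, nd) in lattice: if st in reach and nd
-- not in reach: reach.add(nd); changed = True' — a fold over the edge list carrying (reach, changed)
def pvBPass (lattice : List (String × String)) (reach : PySem.Set String) : PySem.Set String × Bool :=
  lattice.foldl
    (fun a p =>
      if PySem.Set.contains a.1 p.1 && !PySem.Set.contains a.1 p.2 then (PySem.Set.add a.1 p.2, true) else a)
    (reach, false)

-- lemmas pvBPass_mono / pvBPass_true (below the claim block) are cited by the termination proof
lemma pvBFold_mono (lattice : List (String × String)) :
    ∀ (a : PySem.Set String × Bool) (x : String), x ∈ a.1 →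
      x ∈ (lattice.foldl (fun a p => if PySem.Set.contains a.1 p.1 && !PySem.Set.contains a.1 p.2 then (PySem.Set.add a.1 p.2, true) else a) a).1 := by
  induction lattice with
  | nil => intro a x hx; simpa using hx
  | cons p l IH =>
    intro a x hx
    rw [List.foldl_cons]
    by_cases hc : (PySem.Set.contains a.1 p.1 && !PySem.Set.contains a.1 p.2) = true
    · rw [if_pos hc]
      exact IH _ x ((PySem.Set.mem_add a.1 p.2 x).mpr (Or.inl hx))
    · rw [if_neg hc]; exact IH _ x hx

lemma pvBFold_true (lattice : List (String × String)) :
    ∀ (a : PySem.Set String × Bool),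
      (lattice.foldl (fun a p => if PySem.Set.contains a.1 p.1 && !PySem.Set.contains a.1 p.2 then (PySem.Set.add a.1 p.2, true) else a) a).2 = true →
      a.2 = true ∨ ∃ x, x ∈ lattice.map Prod.snd ∧ x ∉ a.1 ∧
        x ∈ (lattice.foldl (fun a p => if PySem.Set.contains a.1 p.1 && !PySem.Set.contains a.1 p.2 then (PySem.Set.add a.1 p.2, true) else a) a).1 := by
  induction lattice with
  | nil => intro a h; exact Or.inl h
  | cons p l IH =>
    intro a h
    rw [List.foldl_cons] at h ⊢
    by_cases hc : (PySem.Set.contains a.1 p.1 && !PySem.Set.contains a.1 p.2) = true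
    · rw [if_pos hc] at h ⊢
      refine Or.inr ⟨p.2, by simp, ?_, ?_⟩
      · intro hmem
        simp at hc
        exact hc.2 hmem
      · exact pvBFold_mono l _ p.2 ((PySem.Set.mem_add a.1 p.2 p.2).mpr (Or.inr rfl))
    · rw [if_neg hc] at h ⊢
      rcases IH _ h with h' | ⟨x, hx1, hx2, hx3⟩
      · exact Or.inl h'
      · exact Or.inr ⟨x, List.mem_cons_of_mem _ (by simpa using hx1), hx2, hx3⟩

-- B's outer while-loop: repeat pvBPass until changed = false
def pvBFix (lattice : List (String × String)) (reach : PySem.Set String) : PySem.Set String :=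
  let p := pvBPass lattice reach
  if p.2 then pvBFix lattice p.1 else p.1
  termination_by ((lattice.map Prod.snd).toFinset \ reach.toFinset).card
  decreasing_by
    rcases pvBFold_true lattice (reach, false) (by assumption) with h | ⟨x, hx1, hx2, hx3⟩
    · simp at h
    · have hsub : (lattice.map Prod.snd).toFinset \ (pvBPass lattice reach).1.toFinset ⊆
          (((lattice.map Prod.snd).toFinset \ reach.toFinset).erase x) := by
        intro y hy
        simp only [Finset.mem_sdiff, List.mem_toFinset, Finset.mem_erase] at hy ⊢
        refine ⟨?_, hy.1, fun hc => hy.2 (pvBFold_mono lattice (reach, false) y hc)⟩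
        intro hyx; subst hyx; exact hy.2 hx3
      have hx : x ∈ ((lattice.map Prod.snd).toFinset \ reach.toFinset) := by
        simp only [Finset.mem_sdiff, List.mem_toFinset]
        exact ⟨hx1, hx2⟩
      calc _ ≤ (((lattice.map Prod.snd).toFinset \ reach.toFinset).erase x).card := Finset.card_le_card hsub
        _ < _ := Finset.card_erase_lt_of_mem hx

def filter_for_starting_states_alt (lattice : List (String × String)) (starting_states : List String) : List (String × String) :=
  -- reach = set(starting_states); while changed: <sweep>
  let reach := pvBFix lattice (PySem.Set.ofList starting_states)
  -- [(st, en) for (st, en) in lattice if st in reach]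
  lattice.filter (fun p => PySem.Set.contains reach p.1)

-- ===== PRECONDITION & SPEC =====
def Spec_filter_for_starting_states (lattice : List (String × String)) (starting_states : List String) (out : List (String × String)) : Prop := out = filter_for_starting_states_alt lattice starting_states
instance (lattice : List (String × String)) (starting_states : List String) (out : List (String × String)) : Decidable (Spec_filter_for_starting_states lattice starting_states out) := by unfold Spec_filter_for_starting_states; infer_instance

-- ===== CLAIM =====
def Claim_equal_filter_for_starting_states : Prop := ∀ (lattice : List (String × String)) (starting_states : List String), Dom_filter_for_starting_states lattice starting_states → Spec_filter_for_starting_states lattice starting_states (filter_for_starting_states lattice starting_states)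

-- ===== LEMMAS AND PROOFS =====

lemma pvALoop_grow (lmap : PySem.Dict String (PySem.Set String)) (reach te : PySem.Set String) :
    ∀ x, x ∈ reach ∨ x ∈ te → x ∈ pvALoop lmap reach te := by
  fun_induction pvALoop lmap reach te with
  | case1 => simp
  | case2 reach next rest reach' te' IH =>
    intro x hx
    apply IH
    by_cases hr' : x ∈ reach'
    · exact Or.inl hr'
    · rcases hx with hx | hx
      · exact absurd ((PySem.Set.mem_add reach next x).mpr (Or.inl hx)) hr'
      · rcases List.mem_cons.mp hx with rfl | hx
        · exact absurd ((PySem.Set.mem_add reach x x).mpr (Or.inr rfl)) hr'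
        · refine Or.inr ?_
          simp only [te', PySem.Set.mem_diff, PySem.Set.mem_union]
          exact ⟨Or.inl hx, hr'⟩

lemma pvALoop_sound (lmap : PySem.Dict String (PySem.Set String)) (P : String → Prop)
    (hstep : ∀ a b, P a → b ∈ lmap.getD a PySem.Set.empty → P b) :
    ∀ (reach te : PySem.Set String), (∀ x ∈ reach, P x) → (∀ x ∈ te, P x) →
      ∀ x ∈ pvALoop lmap reach te, P x := by
  intro reach te
  fun_induction pvALoop lmap reach te with
  | case1 reach => intro h1 _ x hx; exact h1 x hx
  | case2 reach next rest reach' te' IH =>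
    intro h1 h2
    apply IH
    · intro x hx
      rcases (PySem.Set.mem_add reach next x).mp hx with hx | rfl
      · exact h1 x hx
      · exact h2 x (List.mem_cons_self)
    · intro x hx
      rcases ((PySem.Set.mem_diff _ _ x).mp hx).1 |> (PySem.Set.mem_union _ _ x).mp with hx' | hx'
      · exact h2 x (List.mem_cons_of_mem _ hx')
      · exact hstep next x (h2 next List.mem_cons_self) hx'

lemma pvALoop_closed (lmap : PySem.Dict String (PySem.Set String)) :
    ∀ (reach te : PySem.Set String),
      (∀ a b, b ∈ lmap.getD a PySem.Set.empty → a ∈ reach → b ∈ reach ∨ b ∈ te) →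
      ∀ a b, b ∈ lmap.getD a PySem.Set.empty → a ∈ pvALoop lmap reach te → b ∈ pvALoop lmap reach te := by
  intro reach te
  fun_induction pvALoop lmap reach te with
  | case1 reach =>
    intro hcl a b hb ha
    rcases hcl a b hb ha with h | h
    · exact h
    · simp at h
  | case2 reach next rest reach' te' IH =>
    intro hcl
    apply IH
    intro a b hb ha
    by_cases hbr : b ∈ reach'
    · exact Or.inl hbr
    · rcases (PySem.Set.mem_add reach next a).mp ha with ha' | rfl
      · rcases hcl a b hb ha' with h | h
        · exact absurd ((PySem.Set.mem_add reach next b).mpr (Or.inl h)) hbr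
        · rcases List.mem_cons.mp h with rfl | h
          · exact absurd ((PySem.Set.mem_add reach b b).mpr (Or.inr rfl)) hbr
          · refine Or.inr ?_
            simp only [te', PySem.Set.mem_diff, PySem.Set.mem_union]
            exact ⟨Or.inl h, hbr⟩
      · refine Or.inr ?_
        simp only [te', PySem.Set.mem_diff, PySem.Set.mem_union]
        exact ⟨Or.inr hb, hbr⟩

lemma pvMemLmap (l : List (String × String)) :
    ∀ (d : PySem.Dict String (PySem.Set String)) (x y : String),
      y ∈ (l.foldl (fun d p => d.modify p.1 PySem.Set.empty (fun s => PySem.Set.add s p.2)) d).getD x PySem.Set.empty ↔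
        y ∈ d.getD x PySem.Set.empty ∨ (x, y) ∈ l := by
  induction l with
  | nil => intro d x y; simp
  | cons p l IH =>
    obtain ⟨p1, p2⟩ := p
    intro d x y
    rw [List.foldl_cons, IH, PySem.Dict.getD_modify]
    by_cases hx : x = p1
    · subst hx
      rw [if_pos rfl]
      simp only [PySem.Set.mem_add, List.mem_cons, Prod.mk.injEq]
      tauto
    · rw [if_neg hx]
      simp only [List.mem_cons, Prod.mk.injEq]
      tauto

inductive pvRch (E : List (String × String)) (S : List String) : String → Prop
  | base (x : String) : x ∈ S → pvRch E S x
  | step (x y : String) : pvRch E S x → (x, y) ∈ E → pvRch E S y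

lemma pvAFold_grow (lmap : PySem.Dict String (PySem.Set String)) :
    ∀ (S : List String) (r : PySem.Set String), ∀ x ∈ r,
      x ∈ S.foldl (fun r item => pvALoop lmap r (PySem.Set.ofList [item])) r := by
  intro S
  induction S with
  | nil => intro r x hx; simpa using hx
  | cons a S IH =>
    intro r x hx
    rw [List.foldl_cons]
    exact IH _ x (pvALoop_grow lmap r _ x (Or.inl hx))

lemma pvAFold_start (lmap : PySem.Dict String (PySem.Set String)) :
    ∀ (S : List String) (r : PySem.Set String), ∀ i ∈ S,
      i ∈ S.foldl (fun r item => pvALoop lmap r (PySem.Set.ofList [item])) r := by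
  intro S
  induction S with
  | nil => intro r i hi; simp at hi
  | cons a S IH =>
    intro r i hi
    rw [List.foldl_cons]
    rcases List.mem_cons.mp hi with rfl | hi
    · exact pvAFold_grow lmap S _ i (pvALoop_grow lmap r _ i (Or.inr (by simp [PySem.Set.mem_ofList])))
    · exact IH _ i hi

lemma pvAFold_sound (lmap : PySem.Dict String (PySem.Set String)) (P : String → Prop)
    (hstep : ∀ a b, P a → b ∈ lmap.getD a PySem.Set.empty → P b) :
    ∀ (S : List String) (r : PySem.Set String), (∀ x ∈ r, P x) → (∀ i ∈ S, P i) →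
      ∀ x ∈ S.foldl (fun r item => pvALoop lmap r (PySem.Set.ofList [item])) r, P x := by
  intro S
  induction S with
  | nil => intro r h1 _ x hx; exact h1 x (by simpa using hx)
  | cons a S IH =>
    intro r h1 h2 x hx
    rw [List.foldl_cons] at hx
    refine IH _ ?_ (fun i hi => h2 i (List.mem_cons_of_mem _ hi)) x hx
    exact pvALoop_sound lmap P hstep r _ h1
      (fun z hz => by
        have : z = a := by simpa [PySem.Set.mem_ofList] using hz
        exact this ▸ h2 a List.mem_cons_self)

lemma pvAFold_closed (lmap : PySem.Dict String (PySem.Set String)) :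
    ∀ (S : List String) (r : PySem.Set String),
      (∀ a b, b ∈ lmap.getD a PySem.Set.empty → a ∈ r → b ∈ r) →
      ∀ a b, b ∈ lmap.getD a PySem.Set.empty →
        a ∈ S.foldl (fun r item => pvALoop lmap r (PySem.Set.ofList [item])) r →
        b ∈ S.foldl (fun r item => pvALoop lmap r (PySem.Set.ofList [item])) r := by
  intro S
  induction S with
  | nil => intro r hcl a b hb ha; exact hcl a b hb ha
  | cons c S IH =>
    intro r hcl
    rw [List.foldl_cons]
    apply IH
    intro a b hb ha
    exact pvALoop_closed lmap r _ (fun a b hb ha => Or.inl (hcl a b hb ha)) a b hb ha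

lemma pvAReach_iff (lattice : List (String × String)) (S : List String)
    (lmap : PySem.Dict String (PySem.Set String))
    (hlmap : ∀ a b, b ∈ lmap.getD a PySem.Set.empty ↔ (a, b) ∈ lattice) (x : String) :
    x ∈ S.foldl (fun r item => pvALoop lmap r (PySem.Set.ofList [item])) PySem.Set.empty ↔ pvRch lattice S x := by
  constructor
  · intro hx
    refine pvAFold_sound lmap (pvRch lattice S)
      (fun a b ha hb => pvRch.step a b ha ((hlmap a b).mp hb)) S PySem.Set.empty
      (fun z hz => by simp [PySem.Set.empty] at hz) (fun i hi => pvRch.base i hi) x hx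
  · intro hx
    induction hx with
    | base i hi => exact pvAFold_start lmap S _ i hi
    | step a b _ hedge IH =>
      exact pvAFold_closed lmap S PySem.Set.empty
        (fun a b _ ha => by simp [PySem.Set.empty] at ha) a b ((hlmap a b).mpr hedge) IH

-- B-side lemmas about one sweep and the fixpoint

lemma pvBFold_sound (lattice : List (String × String)) (P : String → Prop)
    (hstep : ∀ p ∈ lattice, P p.1 → P p.2) :
    ∀ (a : PySem.Set String × Bool), (∀ x ∈ a.1, P x) →
      ∀ x ∈ (lattice.foldl (fun a p => if PySem.Set.contains a.1 p.1 && !PySem.Set.contains a.1 p.2 then (PySem.Set.add a.1 p.2, true) else a) a).1, P x := by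
  induction lattice with
  | nil => intro a h x hx; exact h x hx
  | cons p l IH =>
    intro a h x hx
    rw [List.foldl_cons] at hx
    by_cases hc : (PySem.Set.contains a.1 p.1 && !PySem.Set.contains a.1 p.2) = true
    · rw [if_pos hc] at hx
      refine IH (fun q hq => hstep q (List.mem_cons_of_mem _ hq)) _ ?_ x hx
      intro y hy
      rcases (PySem.Set.mem_add a.1 p.2 y).mp hy with hy | rfl
      · exact h y hy
      · have hc' := hc
        simp at hc'
        exact hstep p List.mem_cons_self (h p.1 hc'.1)
    · rw [if_neg hc] at hx
      exact IH (fun q hq => hstep q (List.mem_cons_of_mem _ hq)) _ h x hx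

lemma pvBFold_chmono (lattice : List (String × String)) :
    ∀ (a : PySem.Set String × Bool), a.2 = true →
      (lattice.foldl (fun a p => if PySem.Set.contains a.1 p.1 && !PySem.Set.contains a.1 p.2 then (PySem.Set.add a.1 p.2, true) else a) a).2 = true := by
  induction lattice with
  | nil => intro a h; exact h
  | cons p l IH =>
    intro a h
    rw [List.foldl_cons]
    by_cases hc : (PySem.Set.contains a.1 p.1 && !PySem.Set.contains a.1 p.2) = true
    · rw [if_pos hc]; exact IH _ rfl
    · rw [if_neg hc]; exact IH _ h

lemma pvBFold_false (lattice : List (String × String)) :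
    ∀ (a : PySem.Set String × Bool),
      (lattice.foldl (fun a p => if PySem.Set.contains a.1 p.1 && !PySem.Set.contains a.1 p.2 then (PySem.Set.add a.1 p.2, true) else a) a).2 = false →
      (lattice.foldl (fun a p => if PySem.Set.contains a.1 p.1 && !PySem.Set.contains a.1 p.2 then (PySem.Set.add a.1 p.2, true) else a) a).1 = a.1 ∧
        ∀ p ∈ lattice, p.1 ∈ a.1 → p.2 ∈ a.1 := by
  induction lattice with
  | nil => intro a _; exact ⟨rfl, by simp⟩
  | cons p l IH =>
    intro a h
    rw [List.foldl_cons] at h ⊢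
    by_cases hc : (PySem.Set.contains a.1 p.1 && !PySem.Set.contains a.1 p.2) = true
    · rw [if_pos hc] at h
      exfalso
      rw [pvBFold_chmono l (PySem.Set.add a.1 p.2, true) rfl] at h
      exact Bool.noConfusion h
    · rw [if_neg hc] at h ⊢
      obtain ⟨h1, h2⟩ := IH _ h
      refine ⟨h1, ?_⟩
      intro q hq hq1
      rcases List.mem_cons.mp hq with rfl | hq
      · by_contra hq2
        exact hc (by simp [hq1, hq2])
      · exact h2 q hq hq1

lemma pvBFix_grow (lattice : List (String × String)) (reach : PySem.Set String) :
    ∀ x ∈ reach, x ∈ pvBFix lattice reach := by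
  fun_induction pvBFix lattice reach with
  | case1 reach p hp IH =>
    intro x hx
    exact IH x (pvBFold_mono lattice (reach, false) x hx)
  | case2 reach p hp =>
    intro x hx
    exact pvBFold_mono lattice (reach, false) x hx

lemma pvBFix_sound (lattice : List (String × String)) (P : String → Prop)
    (hstep : ∀ p ∈ lattice, P p.1 → P p.2) :
    ∀ (reach : PySem.Set String), (∀ x ∈ reach, P x) → ∀ x ∈ pvBFix lattice reach, P x := by
  intro reach
  fun_induction pvBFix lattice reach with
  | case1 reach p hp IH =>
    intro h x hx
    exact IH (pvBFold_sound lattice P hstep (reach, false) h) x hx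
  | case2 reach p hp =>
    intro h x hx
    exact pvBFold_sound lattice P hstep (reach, false) h x hx

lemma pvBFix_closed (lattice : List (String × String)) :
    ∀ (reach : PySem.Set String), ∀ p ∈ lattice, p.1 ∈ pvBFix lattice reach → p.2 ∈ pvBFix lattice reach := by
  intro reach
  fun_induction pvBFix lattice reach with
  | case1 reach p hp IH =>
    intro q hq h1
    exact IH q hq h1
  | case2 reach p hp =>
    intro q hq h1
    obtain ⟨heq, hcl⟩ := pvBFold_false lattice (reach, false) (Bool.of_not_eq_true hp)
    have heq' : (pvBPass lattice reach).1 = reach := heq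
    rw [heq'] at h1 ⊢
    exact hcl q hq h1

lemma pvBReach_iff (lattice : List (String × String)) (S : List String) (x : String) :
    x ∈ pvBFix lattice (PySem.Set.ofList S) ↔ pvRch lattice S x := by
  constructor
  · intro hx
    refine pvBFix_sound lattice (pvRch lattice S)
      (fun p hp h => pvRch.step p.1 p.2 h hp) (PySem.Set.ofList S)
      (fun z hz => pvRch.base z (by simpa [PySem.Set.mem_ofList] using hz)) x hx
  · intro hx
    induction hx with
    | base i hi => exact pvBFix_grow lattice _ i (by simpa [PySem.Set.mem_ofList] using hi)
    | step a b _ hedge IH => exact pvBFix_closed lattice _ (a, b) hedge IH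

lemma pvContains_congr (s t : PySem.Set String) (h : ∀ a, a ∈ s ↔ a ∈ t) (a : String) :
    PySem.Set.contains s a = PySem.Set.contains t a := by
  by_cases hm : a ∈ s
  · rw [(PySem.Set.contains_iff s a).mpr hm, (PySem.Set.contains_iff t a).mpr ((h a).mp hm)]
  · rw [Bool.eq_false_iff.mpr (fun hc => hm ((PySem.Set.contains_iff s a).mp hc)),
        Bool.eq_false_iff.mpr (fun hc => hm ((h a).mpr ((PySem.Set.contains_iff t a).mp hc)))]

-- ===== VERDICT =====
theorem filter_for_starting_states_spec : Claim_equal_filter_for_starting_states := by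
  intro lattice S _
  unfold Spec_filter_for_starting_states filter_for_starting_states filter_for_starting_states_alt
  apply List.filter_congr
  intro p _
  apply pvContains_congr
  intro a
  have hA := pvAReach_iff lattice S
    (lattice.foldl (fun d p => d.modify p.1 PySem.Set.empty (fun s => PySem.Set.add s p.2)) PySem.Dict.empty)
    (fun a b => (pvMemLmap lattice PySem.Dict.empty a b).trans
      (by simp [PySem.Dict.getD_empty, PySem.Set.empty])) a
  exact hA.trans (pvBReach_iff lattice S a).symm
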